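-- pv_equiv track=rewrite | github.com/HermanMoreno98/codigo-BackEnd | semana1/Dia3/libAlumnos.py | buscarAlumnos
-- ===== SOURCE A (Python) =====
-- def buscarAlumnos(valorBusqueda,alumnos):
--     indexAlumno = -1
--     for i in range(len(alumnos)):
--         dictAlumnoBusqueda = alumnos[i]
--         for clave,valor in dictAlumnoBusqueda.items():
--             if(valor == valorBusqueda and clave == 'email'):
--                 indexAlumno = i
--                 break
--     return indexAlumno
-- ===== SOURCE B (Python) =====
-- def buscarAlumnos(valorBusqueda, alumnos):
--     for i in reversed(range(len(alumnos))):
--         d = alumnos[i]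
--         if 'email' in d and d['email'] == valorBusqueda:
--             return i
--     return -1
-- ===== Notes on version B (the rewrite author's own statement) =====
-- stated objective: alternative
-- what changed: B scans the list in reverse and returns the first index whose dict has an 'email' key equal to the search value (direct key lookup), instead of A's forward scan over all items() pairs that keeps overwriting the last matching index.
import Mathlib
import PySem

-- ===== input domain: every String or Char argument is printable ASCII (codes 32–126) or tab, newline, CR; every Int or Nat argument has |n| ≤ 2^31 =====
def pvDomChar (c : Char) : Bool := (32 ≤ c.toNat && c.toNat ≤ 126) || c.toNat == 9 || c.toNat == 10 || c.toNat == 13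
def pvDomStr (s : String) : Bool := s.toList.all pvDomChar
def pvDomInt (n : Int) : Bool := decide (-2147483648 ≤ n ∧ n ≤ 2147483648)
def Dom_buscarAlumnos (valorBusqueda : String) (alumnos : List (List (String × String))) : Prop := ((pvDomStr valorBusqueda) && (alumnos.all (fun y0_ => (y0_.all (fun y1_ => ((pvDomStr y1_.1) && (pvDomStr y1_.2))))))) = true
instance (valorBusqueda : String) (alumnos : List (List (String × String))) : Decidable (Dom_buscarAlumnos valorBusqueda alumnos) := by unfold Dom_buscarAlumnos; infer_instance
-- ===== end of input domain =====

-- B scans in reverse and returns the first index whose dict maps 'email' to the value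
-- (direct key lookup with early return), instead of A's forward items() scan keeping the last match.

-- ===== PORT A =====
-- inner 'for clave,valor in dictAlumnoBusqueda.items(): if valor==v and clave=="email": indexAlumno=i; break'
def pvAInner (valorBusqueda : String) (i : Nat) : List (String × String) → Int → Int
  | [], idx => idx
  | (clave, valor) :: rest, idx =>
    if valor == valorBusqueda && clave == "email" then (i : Int)
    else pvAInner valorBusqueda i rest idx

def buscarAlumnos (valorBusqueda : String) (alumnos : List (List (String × String))) : Int :=
  (List.range alumnos.length).foldl
    (fun indexAlumno i => pvAInner valorBusqueda i (alumnos.getD i []) indexAlumno) (-1)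

-- ===== PORT B =====
-- "'email' in d and d['email'] == valorBusqueda": first assoc entry with key 'email'
def pvBLookup : List (String × String) → Option String
  | [] => none
  | (k, x) :: rest => if k == "email" then some x else pvBLookup rest

-- 'for i in reversed(range(len(alumnos))): ... return i' / 'return -1'
def pvBScan (valorBusqueda : String) (alumnos : List (List (String × String))) : List Nat → Int
  | [] => -1
  | i :: rest =>
    if pvBLookup (alumnos.getD i []) == some valorBusqueda then (i : Int)
    else pvBScan valorBusqueda alumnos rest

def buscarAlumnos_alt (valorBusqueda : String) (alumnos : List (List (String × String))) : Int :=
  pvBScan valorBusqueda alumnos (List.range alumnos.length).reverse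

-- ===== PRECONDITION & SPEC =====
-- Pre_ excludes assoc lists with a duplicated key inside one student record: a Python dict
-- cannot contain duplicate keys, so no Python input A returns on is excluded; the restriction
-- only rules out assoc-list encodings that do not represent a dict.
def Pre_buscarAlumnos (_valorBusqueda : String) (alumnos : List (List (String × String))) : Prop :=
  ∀ d ∈ alumnos, (d.map Prod.fst).Nodup
instance (valorBusqueda : String) (alumnos : List (List (String × String))) : Decidable (Pre_buscarAlumnos valorBusqueda alumnos) := by unfold Pre_buscarAlumnos; infer_instance

def pvWitness_buscarAlumnos : String × (List (List (String × String))) :=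
  ("a@b.c", [[("name", "Ana")], [("email", "a@b.c"), ("name", "Bo")]])

def Spec_buscarAlumnos (valorBusqueda : String) (alumnos : List (List (String × String))) (out : Int) : Prop := out = buscarAlumnos_alt valorBusqueda alumnos
instance (valorBusqueda : String) (alumnos : List (List (String × String))) (out : Int) : Decidable (Spec_buscarAlumnos valorBusqueda alumnos out) := by unfold Spec_buscarAlumnos; infer_instance

-- ===== CLAIM (what is proved, stated in full; the proofs are below) =====
def Claim_equal_buscarAlumnos : Prop := ∀ (valorBusqueda : String) (alumnos : List (List (String × String))), Dom_buscarAlumnos valorBusqueda alumnos → Pre_buscarAlumnos valorBusqueda alumnos → Spec_buscarAlumnos valorBusqueda alumnos (buscarAlumnos valorBusqueda alumnos)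

-- ===== LEMMAS AND PROOFS =====

-- generic "first match scanning the list, default idx"
def pvScanD (p : Nat → Bool) : List Nat → Int → Int
  | [], idx => idx
  | i :: rest, idx => if p i then (i : Int) else pvScanD p rest idx

theorem pvAInner_eq (v : String) (i : Nat) (d : List (String × String)) (idx : Int) :
    pvAInner v i d idx = if d.any (fun q => q.2 == v && q.1 == "email") then (i : Int) else idx := by
  induction d with
  | nil => simp [pvAInner]
  | cons q rest ih =>
    obtain ⟨k, x⟩ := q
    by_cases h : (x == v && k == "email") = true
    · simp [pvAInner, h]
    · simp [pvAInner, h, ih]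

theorem pvBLookup_eq (v : String) (d : List (String × String)) (hn : (d.map Prod.fst).Nodup) :
    (pvBLookup d == some v) = d.any (fun q => q.2 == v && q.1 == "email") := by
  induction d with
  | nil => simp [pvBLookup]
  | cons q rest ih =>
    obtain ⟨k, x⟩ := q
    simp only [List.map_cons, List.nodup_cons] at hn
    by_cases h : k = "email"
    · subst h
      have : rest.any (fun q => q.2 == v && q.1 == "email") = false := by
        simp only [List.any_eq_false]
        rintro ⟨k', x'⟩ hm
        have : k' ≠ "email" := fun e => hn.1 (e ▸ List.mem_map_of_mem hm)
        simp_all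
      simp [pvBLookup, this]
    · simp [pvBLookup, h, ih hn.2]

theorem pvScanD_append_single (p : Nat → Bool) (m : List Nat) (x : Nat) (idx : Int) :
    pvScanD p (m ++ [x]) idx = pvScanD p m (if p x then (x : Int) else idx) := by
  induction m with
  | nil => simp [pvScanD]
  | cons i rest ih => by_cases h : p i <;> simp [pvScanD, h, ih]

theorem pvFoldl_last (p : Nat → Bool) (l : List Nat) (idx : Int) :
    l.foldl (fun a i => if p i then (i : Int) else a) idx = pvScanD p l.reverse idx := by
  induction l generalizing idx with
  | nil => simp [pvScanD]
  | cons x l ih => simp [List.foldl_cons, ih, pvScanD_append_single]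

theorem pvScanD_congr (p q : Nat → Bool) (l : List Nat) (idx : Int)
    (h : ∀ i ∈ l, p i = q i) : pvScanD p l idx = pvScanD q l idx := by
  induction l with
  | nil => rfl
  | cons i rest ih =>
    simp only [pvScanD, h i (List.mem_cons_self ..)]
    by_cases hq : q i <;> simp [hq, ih fun j hj => h j (List.mem_cons_of_mem _ hj)]

theorem pvBScan_eq_scanD (v : String) (al : List (List (String × String))) (l : List Nat) :
    pvBScan v al l = pvScanD (fun i => pvBLookup (al.getD i []) == some v) l (-1) := by
  induction l with
  | nil => rfl
  | cons i rest ih =>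
    by_cases h : (pvBLookup (al.getD i []) == some v) = true <;> simp [pvBScan, pvScanD, ih, h]

-- ===== VERDICT (by name: the statement is the Claim_ definition above) =====
theorem buscarAlumnos_spec : Claim_equal_buscarAlumnos := by
  intro v al _ hpre
  unfold Spec_buscarAlumnos buscarAlumnos buscarAlumnos_alt
  simp only [pvAInner_eq]
  rw [pvFoldl_last, pvBScan_eq_scanD]
  apply pvScanD_congr
  intro i hi
  have hlt : i < al.length := by
    have := List.mem_reverse.mp hi
    exact List.mem_range.mp this
  have hget : al.getD i [] = al[i] := List.getD_eq_getElem al [] hlt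
  rw [hget, pvBLookup_eq v _ (hpre _ (al.getElem_mem hlt))]
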